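-- pv_equiv track=rewrite | github.com/obierlaire/python2rust | src/python2rust/workflows/test_workflow.py | _extract_compiler_errors
-- ===== SOURCE A (Python) =====
-- from typing import Dict, Any, Optional, List
--
-- def _extract_compiler_errors(error_text: str) -> List[str]:
--     """Extract compiler errors from the error text."""
--     error_lines = []
--     current_error = []
--     in_error = False
--
--     for line in error_text.split('\n'):
--         if 'error[' in line or 'error:' in line:
--             if in_error and current_error:
--                 error_lines.append('\n'.join(current_error))
--             current_error = [line]
--             in_error = True
--         elif in_error and line.strip() and not line.startswith('   Compiling'):
--             current_error.append(line)
--         elif in_error and not line.strip():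
--             if current_error:
--                 error_lines.append('\n'.join(current_error))
--             current_error = []
--             in_error = False
--
--     if current_error:
--         error_lines.append('\n'.join(current_error))
--
--     return error_lines
-- ===== SOURCE B (Python) =====
-- from typing import List
--
-- def _extract_compiler_errors(error_text: str) -> List[str]:
--     """Extract compiler errors: two passes - split into blank-line chunks, then sub-split each chunk at error-start lines."""
--     lines = error_text.split('\n')
--     # pass 1: group lines into chunks separated by blank lines
--     chunks = []
--     chunk = []
--     for line in lines:
--         if line.strip():
--             chunk.append(line)
--         else:
--             chunks.append(chunk)
--             chunk = []
--     chunks.append(chunk)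
--     # pass 2: within each chunk, start a block at each error line, drop preamble and Compiling lines
--     blocks = []
--     for chunk in chunks:
--         sub = None
--         for line in chunk:
--             if 'error[' in line or 'error:' in line:
--                 if sub is not None:
--                     blocks.append('\n'.join(sub))
--                 sub = [line]
--             elif sub is not None and not line.startswith('   Compiling'):
--                 sub.append(line)
--         if sub is not None:
--             blocks.append('\n'.join(sub))
--     return blocks
-- ===== Notes on version B (the rewrite author's own statement) =====
-- stated objective: alternative
-- what changed: Replaces A's single-pass three-variable state machine with a two-pass decomposition: first split the lines into blank-line-separated chunks, then sub-split each chunk at error-start lines, dropping chunk preamble and compiler progress lines.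
import Mathlib
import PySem

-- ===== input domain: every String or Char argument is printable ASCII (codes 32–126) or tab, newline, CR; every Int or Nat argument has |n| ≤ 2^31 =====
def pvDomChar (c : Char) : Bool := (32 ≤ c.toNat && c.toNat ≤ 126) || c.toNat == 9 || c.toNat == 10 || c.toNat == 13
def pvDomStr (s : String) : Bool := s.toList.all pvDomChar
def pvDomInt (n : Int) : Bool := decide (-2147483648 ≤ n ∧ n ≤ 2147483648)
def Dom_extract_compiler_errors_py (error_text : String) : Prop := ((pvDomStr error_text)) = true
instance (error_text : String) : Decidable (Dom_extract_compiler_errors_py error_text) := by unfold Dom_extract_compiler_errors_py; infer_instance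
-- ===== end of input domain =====

-- B replaces A's one-pass state machine by a two-pass split-into-chunks-then-sub-split decomposition (objective: alternative).

-- ===== PORT A =====
-- the body of A's for-loop over the lines, state = (error_lines, current_error, in_error)
def pvAStep : List String × List String × Bool → String → List String × List String × Bool
  | (error_lines, current_error, in_error), line =>
    if PySem.Str.isIn "error[" line || PySem.Str.isIn "error:" line then
      (if in_error && !current_error.isEmpty then error_lines ++ [PySem.Str.join "\n" current_error] else error_lines,
       [line], true)
    else if in_error && !(PySem.Str.strip line == "") && !PySem.Str.startswith line "   Compiling" then
      (error_lines, current_error ++ [line], in_error)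
    else if in_error && (PySem.Str.strip line == "") then
      (if !current_error.isEmpty then error_lines ++ [PySem.Str.join "\n" current_error] else error_lines, [], false)
    else (error_lines, current_error, in_error)

def extract_compiler_errors_py (error_text : String) : List String :=
  let r := ((PySem.Str.split? error_text "\n").getD []).foldl pvAStep ([], [], false)
  if !r.2.1.isEmpty then r.1 ++ [PySem.Str.join "\n" r.2.1] else r.1

-- ===== PORT B =====
-- pass 1 loop body: group lines into blank-line-separated chunks, state = (chunks, chunk)
def pvChunkStep : List (List String) × List String → String → List (List String) × List String
  | (chunks, chunk), line =>
    if PySem.Str.strip line != "" then (chunks, chunk ++ [line]) else (chunks ++ [chunk], [])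

-- pass 2 inner loop body: sub-split a chunk at error-start lines, state = (blocks, sub)
def pvSubStep : List String × Option (List String) → String → List String × Option (List String)
  | (blocks, sub), line =>
    if PySem.Str.isIn "error[" line || PySem.Str.isIn "error:" line then
      ((match sub with
        | some c => blocks ++ [PySem.Str.join "\n" c]
        | none => blocks), some [line])
    else
      match sub with
      | none => (blocks, none)
      | some c =>
        if PySem.Str.startswith line "   Compiling" then (blocks, some c)
        else (blocks, some (c ++ [line]))

-- pass 2 outer loop body: process one chunk, flushing the last sub-block
def pvProcChunk (blocks : List String) (chunk : List String) : List String :=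
  let p := chunk.foldl pvSubStep (blocks, none)
  match p.2 with
  | some c => p.1 ++ [PySem.Str.join "\n" c]
  | none => p.1

def extract_compiler_errors_py_alt (error_text : String) : List String :=
  let lines := (PySem.Str.split? error_text "\n").getD []
  let c := lines.foldl pvChunkStep ([], [])
  (c.1 ++ [c.2]).foldl pvProcChunk []

-- ===== PRECONDITION & SPEC =====
def Spec_extract_compiler_errors_py (error_text : String) (out : List String) : Prop := out = extract_compiler_errors_py_alt error_text
instance (error_text : String) (out : List String) : Decidable (Spec_extract_compiler_errors_py error_text out) := by unfold Spec_extract_compiler_errors_py; infer_instance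

-- ===== CLAIM (what is proved, stated in full; the proofs are below) =====
def Claim_equal_extract_compiler_errors_py : Prop := ∀ (error_text : String), Dom_extract_compiler_errors_py error_text → Spec_extract_compiler_errors_py error_text (extract_compiler_errors_py error_text)

-- ===== LEMMAS AND PROOFS =====

-- proof-only: flush an optional pending block
def pvFlush (sub : Option (List String)) : List String :=
  match sub with
  | some c => [PySem.Str.join "\n" c]
  | none => []

-- proof-only: the common line-by-line meaning both programs compute
def pvG : List String → Option (List String) → List String
  | [], sub => pvFlush sub
  | l :: ls, sub =>
    if PySem.Str.isIn "error[" l || PySem.Str.isIn "error:" l then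
      pvFlush sub ++ pvG ls (some [l])
    else if PySem.Str.strip l == "" then
      pvFlush sub ++ pvG ls none
    else
      match sub with
      | none => pvG ls none
      | some c => if PySem.Str.startswith l "   Compiling" then pvG ls (some c) else pvG ls (some (c ++ [l]))

-- a character of l that is not whitespace survives strip(l)
theorem pv_mem_strip (cs : List Char) (c : Char) (hc : c ∈ cs) (hs : PySem.Chars.isspace c = false) :
    c ∈ PySem.Chars.strip cs := by
  have hmem : ∀ (xs : List Char), c ∈ xs → c ∈ xs.dropWhile PySem.Chars.isspace := by
    intro xs hx
    have := List.takeWhile_append_dropWhile (p := PySem.Chars.isspace) (l := xs)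
    rw [← this] at hx
    rcases List.mem_append.mp hx with h | h
    · exact absurd (List.mem_takeWhile_imp h) (by simp [hs])
    · exact h
  have h1 : c ∈ PySem.Chars.lstrip cs := hmem cs hc
  unfold PySem.Chars.strip PySem.Chars.rstrip
  have h2 : c ∈ (PySem.Chars.lstrip cs).reverse := List.mem_reverse.mpr h1
  exact List.mem_reverse.mpr (hmem _ h2)

-- a blank line contains neither "error[" nor "error:"
theorem pv_blank_not_err (l : String) (h : (PySem.Str.strip l == "") = true) :
    (PySem.Str.isIn "error[" l || PySem.Str.isIn "error:" l) = false := by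
  have hnil : PySem.Chars.strip l.toList = [] := by
    have := PySem.Str.toList_strip l
    rw [eq_of_beq h] at this
    exact this.symm
  have key : ∀ (sub : String), 'r' ∈ sub.toList → PySem.Str.isIn sub l = false := by
    intro sub hr
    by_contra hne
    have htrue : PySem.Str.isIn sub l = true := by
      cases hval : PySem.Str.isIn sub l
      · exact absurd hval hne
      · rfl
    have hinf : sub.toList <:+: l.toList := (PySem.Str.isIn_iff_infix sub l).mp htrue
    have hmem : 'r' ∈ l.toList := hinf.mem hr
    have : 'r' ∈ PySem.Chars.strip l.toList := pv_mem_strip _ _ hmem (by decide)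
    rw [hnil] at this
    exact absurd this (List.not_mem_nil)
  rw [key "error[" (by decide), key "error:" (by decide)]; rfl

-- the chunk-building fold only appends to the accumulated chunk list
theorem pv_chunk_prefix (ls : List String) : ∀ (chs : List (List String)) (cur : List String),
    ls.foldl pvChunkStep (chs, cur)
      = (chs ++ (ls.foldl pvChunkStep ([], cur)).1, (ls.foldl pvChunkStep ([], cur)).2) := by
  induction ls with
  | nil => intro chs cur; simp
  | cons l ls ih =>
    intro chs cur
    simp only [List.foldl_cons, pvChunkStep]
    by_cases hb : (PySem.Str.strip l != "") = true
    · rw [if_pos hb, if_pos hb]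
      exact ih chs (cur ++ [l])
    · rw [if_neg hb, if_neg hb]
      simp only [List.nil_append]
      rw [ih (chs ++ [cur]) [], ih [cur] []]
      simp

-- B's two-pass computation, resumed from a partial chunk, equals pvG
theorem pv_L1 (ls : List String) : ∀ (cur b : List String),
    ((ls.foldl pvChunkStep ([], cur)).1 ++ [(ls.foldl pvChunkStep ([], cur)).2]).foldl pvProcChunk b
      = (cur.foldl pvSubStep (b, none)).1 ++ pvG ls (cur.foldl pvSubStep (b, none)).2 := by
  induction ls with
  | nil =>
    intro cur b
    simp only [List.foldl_nil, List.nil_append, List.foldl_cons, pvProcChunk, pvG]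
    cases hp : (cur.foldl pvSubStep (b, none)).2 <;> simp [pvFlush]
  | cons l ls ih =>
    intro cur b
    simp only [List.foldl_cons, pvChunkStep]
    by_cases hb : (PySem.Str.strip l == "") = true
    · -- blank line: current chunk closes
      have hb' : ¬ ((PySem.Str.strip l != "") = true) := by simp [bne, hb]
      rw [if_neg hb']
      simp only [List.nil_append]
      rw [pv_chunk_prefix ls [cur] []]
      have hsplit : (([cur] ++ (ls.foldl pvChunkStep ([], [])).1) ++ [(ls.foldl pvChunkStep ([], [])).2]).foldl pvProcChunk b
          = ((ls.foldl pvChunkStep ([], [])).1 ++ [(ls.foldl pvChunkStep ([], [])).2]).foldl pvProcChunk (pvProcChunk b cur) := by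
        simp
      rw [hsplit, ih [] (pvProcChunk b cur)]
      simp only [List.foldl_nil]
      have hG : pvG (l :: ls) (cur.foldl pvSubStep (b, none)).2
          = pvFlush (cur.foldl pvSubStep (b, none)).2 ++ pvG ls none := by
        simp only [pvG]
        rw [if_neg (by rw [pv_blank_not_err l hb]; simp), if_pos hb]
      rw [hG]
      have hPC : pvProcChunk b cur = (cur.foldl pvSubStep (b, none)).1 ++ pvFlush (cur.foldl pvSubStep (b, none)).2 := by
        unfold pvProcChunk
        cases hp : (cur.foldl pvSubStep (b, none)).2 <;> simp [hp, pvFlush]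
      rw [hPC, List.append_assoc]
    · -- non-blank line: extend the current chunk
      have hb' : (PySem.Str.strip l != "") = true := by simp [bne, hb]
      rw [if_pos hb']
      rw [ih (cur ++ [l]) b, List.foldl_append]
      simp only [List.foldl_cons, List.foldl_nil]
      set p := cur.foldl pvSubStep (b, none) with hp
      have hpeta : p = (p.1, p.2) := rfl
      by_cases he : (PySem.Str.isIn "error[" l || PySem.Str.isIn "error:" l) = true
      · have hstep : pvSubStep p l = ((match p.2 with
            | some c => p.1 ++ [PySem.Str.join "\n" c]
            | none => p.1), some [l]) := by
          rw [hpeta]; simp only [pvSubStep]; rw [if_pos he]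
        rw [hstep]
        have hG : pvG (l :: ls) p.2 = pvFlush p.2 ++ pvG ls (some [l]) := by
          simp only [pvG]; rw [if_pos he]
        rw [hG]
        cases hc : p.2 <;> simp [pvFlush]
      · have hstep : pvSubStep p l
            = (match p.2 with
               | none => (p.1, none)
               | some c => if PySem.Str.startswith l "   Compiling" then (p.1, some c) else (p.1, some (c ++ [l]))) := by
          rw [hpeta]; simp only [pvSubStep]; rw [if_neg he]
        have hG : pvG (l :: ls) p.2
            = (match p.2 with
               | none => pvG ls none
               | some c => if PySem.Str.startswith l "   Compiling" then pvG ls (some c) else pvG ls (some (c ++ [l]))) := by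
          simp only [pvG]; rw [if_neg he, if_neg (by simp [hb])]
        rw [hG, hstep]
        cases hc : p.2 with
        | none => dsimp only
        | some c =>
          dsimp only
          by_cases hcomp : PySem.Str.startswith l "   Compiling" = true
          · rw [if_pos hcomp, if_pos hcomp]
          · rw [if_neg hcomp, if_neg hcomp]

-- A's state machine, from a well-formed state, equals pvG
theorem pv_L2 (ls : List String) : ∀ (acc cur : List String) (inerr : Bool),
    (inerr = false → cur = []) → (inerr = true → cur ≠ []) →
    (let r := ls.foldl pvAStep (acc, cur, inerr)
     if !r.2.1.isEmpty then r.1 ++ [PySem.Str.join "\n" r.2.1] else r.1)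
      = acc ++ pvG ls (if inerr then some cur else none) := by
  induction ls with
  | nil =>
    intro acc cur inerr h0 h1
    cases inerr
    · simp [h0 rfl, pvG, pvFlush]
    · have hcur := h1 rfl
      simp only [List.foldl_nil]
      rw [if_pos (by simp [hcur])]
      simp [pvG, pvFlush]
  | cons l ls ih =>
    intro acc cur inerr h0 h1
    simp only [List.foldl_cons]
    by_cases he : (PySem.Str.isIn "error[" l || PySem.Str.isIn "error:" l) = true
    · have hstep : pvAStep (acc, cur, inerr) l
          = (if inerr && !cur.isEmpty then acc ++ [PySem.Str.join "\n" cur] else acc, [l], true) := by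
        simp only [pvAStep]; rw [if_pos he]
      rw [hstep, ih _ [l] true (by simp) (by simp)]
      have hG : pvG (l :: ls) (if inerr then some cur else none)
          = pvFlush (if inerr then some cur else none) ++ pvG ls (some [l]) := by
        simp only [pvG]; rw [if_pos he]
      rw [hG]
      cases inerr
      · simp [pvFlush]
      · have hcur := h1 rfl
        rw [if_pos (by simp [hcur])]
        simp [pvFlush]
    · cases inerr
      · -- not in an error block: the line is ignored
        have hcur : cur = [] := h0 rfl
        have hstep : pvAStep (acc, cur, false) l = (acc, cur, false) := by
          simp only [pvAStep]; rw [if_neg he]; rfl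
        rw [hstep, ih acc cur false h0 h1, hcur]
        have hG : pvG (l :: ls) none = pvG ls none := by
          by_cases hb : (PySem.Str.strip l == "") = true
          · simp only [pvG]; rw [if_neg he, if_pos hb]; simp [pvFlush]
          · simp only [pvG]; rw [if_neg he, if_neg hb]
        exact congrArg (acc ++ ·) hG.symm
      · have hcur : cur ≠ [] := h1 rfl
        have hempF : cur.isEmpty = false := by simp [hcur]
        rw [show (if true then some cur else none : Option (List String)) = some cur from rfl]
        by_cases hb : (PySem.Str.strip l == "") = true
        · -- blank line: flush and leave the error block
          have hbF : (PySem.Str.strip l != "") = false := by simp [bne, hb]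
          have hstep : pvAStep (acc, cur, true) l
              = (if !cur.isEmpty then acc ++ [PySem.Str.join "\n" cur] else acc, [], false) := by
            simp only [pvAStep]
            rw [if_neg he,
                if_neg (show ¬ ((true && !(PySem.Str.strip l == "") && !PySem.Str.startswith l "   Compiling") = true) by
                  rw [eq_of_beq hb]; simp),
                if_pos (show (true && (PySem.Str.strip l == "")) = true by rw [hb]; rfl)]
          rw [hstep, ih _ [] false (by simp) (by simp), if_pos (by simp [hempF])]
          have hG : pvG (l :: ls) (some cur) = pvFlush (some cur) ++ pvG ls none := by
            simp only [pvG]; rw [if_neg he, if_pos hb]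
          rw [hG]
          simp [pvFlush]
        · have hbF : (PySem.Str.strip l == "") = false := by
            cases hv : (PySem.Str.strip l == "") with
            | false => rfl
            | true => exact absurd hv hb
          by_cases hcomp : PySem.Str.startswith l "   Compiling" = true
          · -- "   Compiling" line inside an error block: ignored
            have hstep : pvAStep (acc, cur, true) l = (acc, cur, true) := by
              simp only [pvAStep]
              rw [if_neg he,
                  if_neg (show ¬ ((true && !(PySem.Str.strip l == "") && !PySem.Str.startswith l "   Compiling") = true) by
                    rw [hcomp]; simp),
                  if_neg (show ¬ ((true && (PySem.Str.strip l == "")) = true) by rw [hbF]; simp)]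
            rw [hstep, ih acc cur true (by simp) h1]
            have hG : pvG (l :: ls) (some cur) = pvG ls (some cur) := by
              simp only [pvG]; rw [if_neg he, if_neg hb, if_pos hcomp]
            rw [hG]; rfl
          · -- ordinary line inside an error block: appended
            have hcompF : PySem.Str.startswith l "   Compiling" = false := by
              cases hv : PySem.Str.startswith l "   Compiling" with
              | false => rfl
              | true => exact absurd hv hcomp
            have hstep : pvAStep (acc, cur, true) l = (acc, cur ++ [l], true) := by
              simp only [pvAStep]
              rw [if_neg he,
                  if_pos (show (true && !(PySem.Str.strip l == "") && !PySem.Str.startswith l "   Compiling") = true by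
                    rw [hbF, hcompF]; rfl)]
            rw [hstep, ih acc (cur ++ [l]) true (by simp) (by simp)]
            have hG : pvG (l :: ls) (some cur) = pvG ls (some (cur ++ [l])) := by
              simp only [pvG]; rw [if_neg he, if_neg hb, if_neg hcomp]
            rw [hG]; rfl

-- ===== VERDICT (by name: the statement is the Claim_ definition above) =====
theorem extract_compiler_errors_py_spec : Claim_equal_extract_compiler_errors_py := by
  intro error_text _
  unfold Spec_extract_compiler_errors_py extract_compiler_errors_py extract_compiler_errors_py_alt
  rw [pv_L1 _ [] [], pv_L2 _ [] [] false (by simp) (by simp)]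
  simp
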